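-- pv_equiv track=rewrite | github.com/bmanandhar/python_refresher | isogram_matcher.py | isogram_matcher
-- ===== SOURCE A (Python) =====
-- def isogram_matcher(word1, word2):
--
--     # x: number of matching chars and indices
--     # y: number of matching chars but unmatched indices
--
--     x, y = 0, 0
--
--     for i in range(len(word1)):
--
--         for j in range(len(word1)):
--             if word1[i] == word2[j]:
--
--                 if i == j:
--                     x += 1
--                 else:
--                     y += 1
--
--     return [x, y]
-- ===== SOURCE B (Python) =====
-- def isogram_matcher(word1, word2):
--     # O(n): same-index matches in one zip pass; cross matches = total matches - x,
--     # where total = sum over chars of word1 of their frequency in word2[:len(word1)].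
--     n = len(word1)
--     w2 = word2[:n]
--     x = 0
--     for a, b in zip(word1, w2):
--         if a == b:
--             x += 1
--     freq = {}
--     for ch in w2:
--         freq[ch] = freq.get(ch, 0) + 1
--     total = 0
--     for ch in word1:
--         total += freq.get(ch, 0)
--     return [x, total - x]
-- ===== Notes on version B (the rewrite author's own statement) =====
-- stated objective: faster
-- what changed: Replaced the quadratic double loop over index pairs by a single-pass count: same-index matches via one zip pass, cross-index matches as (sum of word2[:len(word1)] frequencies over word1's chars) minus the same-index matches.
import Mathlib
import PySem

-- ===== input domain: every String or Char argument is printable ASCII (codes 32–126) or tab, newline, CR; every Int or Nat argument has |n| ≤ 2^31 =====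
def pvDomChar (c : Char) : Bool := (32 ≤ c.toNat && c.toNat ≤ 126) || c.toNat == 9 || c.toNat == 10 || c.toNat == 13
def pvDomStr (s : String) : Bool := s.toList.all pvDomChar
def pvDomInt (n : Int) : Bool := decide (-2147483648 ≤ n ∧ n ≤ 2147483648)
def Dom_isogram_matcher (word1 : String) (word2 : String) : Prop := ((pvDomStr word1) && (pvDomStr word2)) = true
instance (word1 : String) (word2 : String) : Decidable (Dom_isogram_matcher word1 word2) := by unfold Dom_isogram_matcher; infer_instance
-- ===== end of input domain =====

-- B replaces A's quadratic double index loop by one linear counting pass (same-index matches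
-- by a zip pass; cross matches = frequency-weighted total minus same-index matches).

-- ===== PORT A =====
-- word1[i] / word2[j] are ported as pyGetD; exact under Pre_ (len(word1) ≤ len(word2)),
-- which keeps every accessed index in range (Python raises IndexError otherwise).
def isogram_matcher (word1 : String) (word2 : String) : List Int :=
  let w1 := word1.toList
  let w2 := word2.toList
  let p := (PySem.List.pyRange 0 (PySem.Str.len word1) 1).foldl (fun (s : Int × Int) i =>
      (PySem.List.pyRange 0 (PySem.Str.len word1) 1).foldl (fun (s : Int × Int) j =>
        if PySem.List.pyGetD w1 i ' ' = PySem.List.pyGetD w2 j ' ' then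
          if i = j then (s.1 + 1, s.2) else (s.1, s.2 + 1)
        else s) s) ((0 : Int), (0 : Int))
  [p.1, p.2]

-- ===== PORT B =====
-- transliteration of Source B: w2 = word2[:n]; one zip pass for x; a frequency dict for the total.
def isogram_matcher_alt (word1 : String) (word2 : String) : List Int :=
  let w1 := word1.toList
  let n := w1.length
  let w2 := PySem.List.slice word2.toList none (some (n : Int))
  let x := (w1.zip w2).foldl (fun (acc : Int) p => if p.1 = p.2 then acc + 1 else acc) 0
  let freq := w2.foldl (fun (d : PySem.Dict Char Int) ch => d.insert ch (d.getD ch 0 + 1)) PySem.Dict.empty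
  let total := w1.foldl (fun (acc : Int) ch => acc + freq.getD ch 0) 0
  [x, total - x]

-- ===== PRECONDITION & SPEC =====
-- A indexes word2 at every j < len(word1): it raises IndexError exactly when len(word1) > len(word2).
def Pre_isogram_matcher (word1 : String) (word2 : String) : Prop :=
  word1.toList.length ≤ word2.toList.length
instance (word1 : String) (word2 : String) : Decidable (Pre_isogram_matcher word1 word2) := by
  unfold Pre_isogram_matcher; infer_instance

def pvWitness_isogram_matcher : String × String := ("ab", "ba")

def Spec_isogram_matcher (word1 : String) (word2 : String) (out : List Int) : Prop :=
  out = isogram_matcher_alt word1 word2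
instance (word1 : String) (word2 : String) (out : List Int) : Decidable (Spec_isogram_matcher word1 word2 out) := by
  unfold Spec_isogram_matcher; infer_instance

-- ===== CLAIM (what is proved, stated in full; the proofs are below) =====
def Claim_equal_isogram_matcher : Prop := ∀ (word1 : String) (word2 : String), Dom_isogram_matcher word1 word2 → Pre_isogram_matcher word1 word2 → Spec_isogram_matcher word1 word2 (isogram_matcher word1 word2)


-- ===== LEMMAS AND PROOFS =====

-- a fold whose step adds independent increments to each pair component is a pair of sums
theorem pvPairFold (l : List Nat) (u v : Nat → Int) (s : Int × Int) :
    l.foldl (fun s j => (s.1 + u j, s.2 + v j)) s = (s.1 + (l.map u).sum, s.2 + (l.map v).sum) := by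
  induction l generalizing s with
  | nil => simp
  | cons x l ih => simp [ih]; constructor <;> ring

-- only the j = i term of the indicator sum survives
theorem pvSumDiag (p : Nat → Prop) [DecidablePred p] (n i : Nat) (hi : i < n) :
    ((List.range n).map (fun j => if p j ∧ i = j then (1:Int) else 0)).sum
      = if p i then 1 else 0 := by
  induction n with
  | zero => omega
  | succ m ih =>
    rw [List.range_succ, List.map_append, List.sum_append]
    by_cases h : i < m
    · rw [ih h]; simp; omega
    · have him : i = m := by omega
      subst him
      have hz : ((List.range i).map (fun j => if p j ∧ i = j then (1:Int) else 0)).sum = 0 := by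
        apply List.sum_eq_zero
        intro x hx
        simp only [List.mem_map] at hx
        obtain ⟨j, hj, rfl⟩ := hx
        simp only [List.mem_range] at hj
        simp; omega
      rw [hz]; simp

theorem pvSumMapSub {α : Type} (l : List α) (f g : α → Int) :
    (l.map (fun j => f j - g j)).sum = (l.map f).sum - (l.map g).sum := by
  induction l with
  | nil => simp
  | cons x l ih => simp [ih]; ring

-- reading a list by index over range(len) is the list itself (mapped)
theorem pvMapRangeGetD {β : Type} (xs : List Char) (d : Char) (f : Char → β) :
    (List.range xs.length).map (fun j => f (xs.getD j d)) = xs.map f := by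
  induction xs with
  | nil => simp
  | cons y xs ih =>
    rw [List.length_cons, List.range_succ_eq_map, List.map_cons, List.map_map]
    simp only [Function.comp_def, List.getD_cons_succ, List.getD_cons_zero]
    rw [ih, List.map_cons]

-- the positional same-index indicator sum is the zip count (equal lengths)
theorem pvZipCount (a b : List Char) (h : a.length = b.length) :
    ((List.range a.length).map (fun i => if a.getD i ' ' = b.getD i ' ' then (1:Int) else 0)).sum
      = ((a.zip b).countP (fun p => decide (p.1 = p.2)) : Int) := by
  induction a generalizing b with
  | nil => simp
  | cons x a ih =>
    cases b with
    | nil => simp at h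
    | cons y b =>
      simp only [List.length_cons]
      rw [List.range_succ_eq_map, List.map_cons, List.map_map, List.sum_cons]
      simp only [Function.comp_def, List.getD_cons_succ, List.getD_cons_zero]
      rw [ih b (by simpa using h)]
      simp only [List.zip_cons_cons, List.countP_cons]
      by_cases hxy : x = y
      · simp [hxy]; ring
      · simp [hxy]

-- the positional membership-indicator sum is list count
theorem pvCountSum (t : List Char) (c : Char) :
    ((List.range t.length).map (fun j => if c = t.getD j ' ' then (1:Int) else 0)).sum
      = (t.count c : Int) := by
  induction t with
  | nil => simp
  | cons y t ih =>
    rw [List.length_cons, List.range_succ_eq_map, List.map_cons, List.map_map, List.sum_cons]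
    simp only [Function.comp_def, List.getD_cons_succ, List.getD_cons_zero]
    rw [ih, List.count_cons]
    by_cases h : c = y
    · simp [h]; ring
    · simp [h]
      exact fun hy => h hy.symm

theorem isogram_matcher_spec : Claim_equal_isogram_matcher := by
  intro w1s w2s hdom hpre
  unfold Spec_isogram_matcher
  simp only [isogram_matcher, isogram_matcher_alt]
  unfold Pre_isogram_matcher at hpre
  set l1 := w1s.toList with hl1
  set l2 := w2s.toList with hl2
  -- B side normalisation
  rw [PySem.List.slice_to_natCast]
  set t := List.take l1.length l2 with ht
  have htlen : t.length = l1.length := by rw [ht]; simp; omega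
  rw [PySem.List.foldl_ite_add_one, PySem.Dict.foldl_insert_getD_add_one_eq_counter,
      PySem.List.foldl_add]
  simp only [PySem.Dict.getD_counter]
  -- A side normalisation: pyRange over Nat range, then each pair-fold is a pair of sums
  simp only [PySem.Str.len_eq, ← hl1]
  rw [PySem.List.pyRange_zero_natCast]
  simp only [List.foldl_map]
  have hfun : ∀ i : Nat,
      (fun (x : Int × Int) (j : Nat) =>
        if PySem.List.pyGetD l1 (↑i) ' ' = PySem.List.pyGetD l2 (↑j) ' ' then
          if (↑i : Int) = (↑j : Int) then (x.1 + 1, x.2) else (x.1, x.2 + 1) else x)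
      = (fun (x : Int × Int) (j : Nat) =>
        (x.1 + (if l1.getD i ' ' = l2.getD j ' ' ∧ i = j then (1:Int) else 0),
         x.2 + (if l1.getD i ' ' = l2.getD j ' ' ∧ ¬ i = j then (1:Int) else 0))) := by
    intro i; funext x j
    simp only [PySem.List.pyGetD_natCast, Nat.cast_inj]
    by_cases h2 : i = j <;> simp [h2] <;> split <;> simp
  simp only [hfun, pvPairFold]
  -- bridge lemmas
  have hgetD : ∀ j, j < l1.length → l2.getD j ' ' = t.getD j ' ' := by
    intro j hj
    simp [ht, List.getD_eq_getElem?_getD, hj]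
  have hdiag : (List.range l1.length).map (fun i => ((List.range l1.length).map
        (fun j => if l1.getD i ' ' = l2.getD j ' ' ∧ i = j then (1:Int) else 0)).sum)
      = (List.range l1.length).map (fun i => if l1.getD i ' ' = t.getD i ' ' then (1:Int) else 0) := by
    apply List.map_congr_left; intro i hi
    have hi' := List.mem_range.mp hi
    rw [pvSumDiag (fun j => l1.getD i ' ' = l2.getD j ' ') l1.length i hi', hgetD i hi']
  have hX : ((List.range l1.length).map (fun i => if l1.getD i ' ' = t.getD i ' ' then (1:Int) else 0)).sum
      = (List.countP (fun p => decide (p.1 = p.2)) (l1.zip t) : Int) :=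
    pvZipCount l1 t htlen.symm
  have hTi : ∀ i ∈ List.range l1.length, ((List.range l1.length).map
        (fun j => if l1.getD i ' ' = l2.getD j ' ' then (1:Int) else 0)).sum
      = (t.count (l1.getD i ' ') : Int) := by
    intro i hi
    have hcong : (List.range l1.length).map (fun j => if l1.getD i ' ' = l2.getD j ' ' then (1:Int) else 0)
        = (List.range l1.length).map (fun j => if l1.getD i ' ' = t.getD j ' ' then (1:Int) else 0) := by
      apply List.map_congr_left; intro j hj; rw [hgetD j (List.mem_range.mp hj)]
    rw [hcong, ← htlen]
    exact pvCountSum t (l1.getD i ' ')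
  have hS2 : ∀ i ∈ List.range l1.length, ((List.range l1.length).map
        (fun j => if l1.getD i ' ' = l2.getD j ' ' ∧ ¬ i = j then (1:Int) else 0)).sum
      = (t.count (l1.getD i ' ') : Int) - ((List.range l1.length).map
        (fun j => if l1.getD i ' ' = l2.getD j ' ' ∧ i = j then (1:Int) else 0)).sum := by
    intro i hi
    have hsplit : (List.range l1.length).map (fun j => if l1.getD i ' ' = l2.getD j ' ' ∧ ¬ i = j then (1:Int) else 0)
        = (List.range l1.length).map (fun j => (if l1.getD i ' ' = l2.getD j ' ' then (1:Int) else 0)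
            - (if l1.getD i ' ' = l2.getD j ' ' ∧ i = j then (1:Int) else 0)) := by
      apply List.map_congr_left; intro j hj
      by_cases h2 : i = j <;> simp [h2]
    rw [hsplit, pvSumMapSub, hTi i hi]
  have hmap2 := List.map_congr_left hS2
  rw [hmap2, pvSumMapSub, hdiag, hX,
      pvMapRangeGetD l1 ' ' (fun ch => ((t.count ch : Nat) : Int))]
  simp
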